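-- pv_equiv track=rewrite | github.com/ryanhood1995/codenames_ai | archive/play_games.py | find_basic_statistics
-- ===== SOURCE A (Python) =====
-- def find_basic_statistics(winners, first_players):
--     """ This method takes a list of winners and first players and finds basic statistics about it. """
--
--     num_games = len(winners)
--     num_red_wins = 0
--     num_blue_wins = 0
--     num_first_player_wins = 0
--     num_second_player_wins = 0
--
--     for game_index in range(0, num_games):
--         winner = winners[game_index]
--         first_player = first_players[game_index]
--
--         if winner == first_player:
--             num_first_player_wins = num_first_player_wins + 1
--         else:
--             num_second_player_wins = num_second_player_wins + 1
--
--         if winner == 'red':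
--             num_red_wins = num_red_wins + 1
--         else:
--             num_blue_wins = num_blue_wins + 1
--
--     return num_red_wins, num_blue_wins, num_first_player_wins, num_second_player_wins
-- ===== SOURCE B (Python) =====
-- def find_basic_statistics(winners, first_players):
--     """Divide and conquer: split the games in half, solve each half recursively,
--     and add the four counts of the halves."""
--     n = len(winners)
--     if n == 0:
--         return 0, 0, 0, 0
--     if n == 1:
--         w = winners[0]
--         f = first_players[0]
--         fp_win = 1 if w == f else 0
--         red_win = 1 if w == 'red' else 0
--         return red_win, 1 - red_win, fp_win, 1 - fp_win
--     m = n // 2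
--     r1, b1, f1, s1 = find_basic_statistics(winners[:m], first_players[:m])
--     r2, b2, f2, s2 = find_basic_statistics(winners[m:], first_players[m:])
--     return r1 + r2, b1 + b2, f1 + f2, s1 + s2
-- ===== Notes on version B (the rewrite author's own statement) =====
-- stated objective: alternative
-- what changed: Replaces A's single index loop maintaining four counters with a divide-and-conquer recursion that splits the game lists in half, solves each half, and adds the halves' four counts.
import Mathlib
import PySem

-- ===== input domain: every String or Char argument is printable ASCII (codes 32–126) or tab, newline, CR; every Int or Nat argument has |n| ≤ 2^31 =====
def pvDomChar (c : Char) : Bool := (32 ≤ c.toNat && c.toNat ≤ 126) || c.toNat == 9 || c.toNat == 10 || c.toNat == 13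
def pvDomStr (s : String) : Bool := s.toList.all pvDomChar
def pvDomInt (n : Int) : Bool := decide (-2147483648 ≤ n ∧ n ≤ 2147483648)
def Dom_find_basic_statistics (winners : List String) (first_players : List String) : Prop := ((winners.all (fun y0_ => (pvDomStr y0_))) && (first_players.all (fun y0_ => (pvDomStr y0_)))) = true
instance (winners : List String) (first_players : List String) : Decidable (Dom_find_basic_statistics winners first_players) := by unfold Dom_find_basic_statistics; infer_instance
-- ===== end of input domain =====

-- B computes the same four statistics by divide-and-conquer (split in half, add the halves'
-- counts) instead of A's single index loop maintaining four counters.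

-- ===== PORT A =====
-- loop body of A: the two if/else counter updates
def pvStepA (st : Int × Int × Int × Int) (winner first_player : String) : Int × Int × Int × Int :=
  let (r, b, f, s) := st
  let (f, s) := if winner == first_player then (f + 1, s) else (f, s + 1)
  let (r, b) := if winner == "red" then (r + 1, b) else (r, b + 1)
  (r, b, f, s)

-- 'for game_index in range(0, num_games)' with indexing into both lists
def pvLoopA (winners first_players : List String) (i : Nat) (st : Int × Int × Int × Int) :
    Int × Int × Int × Int :=
  if h : i < winners.length then
    pvLoopA winners first_players (i + 1)
      (pvStepA st ((PySem.List.pyGet? winners (i : Int)).getD "")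
                  ((PySem.List.pyGet? first_players (i : Int)).getD ""))
  else st
termination_by winners.length - i

def find_basic_statistics (winners : List String) (first_players : List String) : Int × Int × Int × Int :=
  pvLoopA winners first_players 0 (0, 0, 0, 0)

-- ===== PORT B =====
def find_basic_statistics_alt (winners : List String) (first_players : List String) : Int × Int × Int × Int :=
  let n := winners.length
  if n = 0 then (0, 0, 0, 0)
  else if n = 1 then
    let w := (PySem.List.pyGet? winners 0).getD ""
    let f := (PySem.List.pyGet? first_players 0).getD ""
    let fp_win : Int := if w == f then 1 else 0
    let red_win : Int := if w == "red" then 1 else 0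
    (red_win, 1 - red_win, fp_win, 1 - fp_win)
  else
    let m := n / 2
    let (r1, b1, f1, s1) :=
      find_basic_statistics_alt (PySem.List.slice winners none (some (m : Int)))
                                (PySem.List.slice first_players none (some (m : Int)))
    let (r2, b2, f2, s2) :=
      find_basic_statistics_alt (PySem.List.slice winners (some (m : Int)) none)
                                (PySem.List.slice first_players (some (m : Int)) none)
    (r1 + r2, b1 + b2, f1 + f2, s1 + s2)
termination_by winners.length
decreasing_by
  · rw [PySem.List.slice_to_natCast]; simp; omega
  · rw [PySem.List.slice_from_natCast]; simp; omega

-- ===== PRECONDITION & SPEC =====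
-- A indexes first_players[game_index] for every game_index < len(winners): it raises IndexError
-- when first_players is shorter than winners, so exactly those inputs are excluded.
def Pre_find_basic_statistics (winners : List String) (first_players : List String) : Prop :=
  winners.length ≤ first_players.length
instance (winners : List String) (first_players : List String) : Decidable (Pre_find_basic_statistics winners first_players) := by unfold Pre_find_basic_statistics; infer_instance

def pvWitness_find_basic_statistics : List String × List String :=
  (["red", "blue", "red"], ["red", "red", "blue"])

def Spec_find_basic_statistics (winners : List String) (first_players : List String) (out : Int × Int × Int × Int) : Prop := out = find_basic_statistics_alt winners first_players
instance (winners : List String) (first_players : List String) (out : Int × Int × Int × Int) : Decidable (Spec_find_basic_statistics winners first_players out) := by unfold Spec_find_basic_statistics; infer_instance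

-- ===== CLAIM (what is proved, stated in full; the proofs are below) =====
def Claim_equal_find_basic_statistics : Prop := ∀ (winners : List String) (first_players : List String), Dom_find_basic_statistics winners first_players → Pre_find_basic_statistics winners first_players → Spec_find_basic_statistics winners first_players (find_basic_statistics winners first_players)

-- ===== LEMMAS AND PROOFS =====

-- the common closed form: (red wins, blue wins, first-player wins, second-player wins)
def pvClosed (w f : List String) : Int × Int × Int × Int :=
  ((w.countP (· == "red") : Int), (w.length : Int) - (w.countP (· == "red") : Int),
   ((w.zip f).countP (fun p => p.1 == p.2) : Int),
   (w.length : Int) - ((w.zip f).countP (fun p => p.1 == p.2) : Int))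

-- A's index loop, run from index i, is the fold of its step over the zipped suffixes.
lemma pvLoopA_eq_zip (winners first_players : List String)
    (hle : winners.length ≤ first_players.length) :
    ∀ k i st, winners.length - i = k →
      pvLoopA winners first_players i st =
        ((winners.drop i).zip (first_players.drop i)).foldl (fun st p => pvStepA st p.1 p.2) st := by
  intro k
  induction k with
  | zero =>
    intro i st hk
    have hni : ¬ i < winners.length := by omega
    rw [pvLoopA, dif_neg hni, List.drop_eq_nil_of_le (by omega)]
    simp
  | succ k ih =>
    intro i st hk
    have hi : i < winners.length := by omega
    have hif : i < first_players.length := by omega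
    rw [pvLoopA, dif_pos hi, ih (i + 1) _ (by omega),
        List.drop_eq_getElem_cons hi, List.drop_eq_getElem_cons hif]
    simp only [List.zip_cons_cons, List.foldl_cons]
    simp only [PySem.List.pyGet?_natCast, List.getElem?_eq_getElem, hi, hif, Option.getD_some]

-- closed form of the fold of A's step function
lemma zipFold_spec : ∀ (ps : List (String × String)) (r b f s : Int),
    ps.foldl (fun st p => pvStepA st p.1 p.2) (r, b, f, s) =
      (r + (ps.countP (fun p => p.1 == "red") : Int),
       b + ((ps.length : Int) - (ps.countP (fun p => p.1 == "red") : Int)),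
       f + (ps.countP (fun p => p.1 == p.2) : Int),
       s + ((ps.length : Int) - (ps.countP (fun p => p.1 == p.2) : Int))) := by
  intro ps
  induction ps with
  | nil => intro r b f s; simp
  | cons p ps ih =>
    intro r b f s
    rw [List.foldl_cons]
    by_cases h1 : (p.1 == p.2) = true <;> by_cases h2 : (p.1 == "red") = true
    · rw [show pvStepA (r, b, f, s) p.1 p.2 = (r + 1, b, f + 1, s) from by simp [pvStepA, h1, h2], ih]
      simp only [List.countP_cons, List.length_cons, h1, h2, if_true, Prod.mk.injEq]
      push_cast; omega
    · rw [show pvStepA (r, b, f, s) p.1 p.2 = (r, b + 1, f + 1, s) from by simp [pvStepA, h1, h2], ih]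
      simp only [List.countP_cons, List.length_cons, h1, h2, if_true, Prod.mk.injEq]
      push_cast; omega
    · rw [show pvStepA (r, b, f, s) p.1 p.2 = (r + 1, b, f, s + 1) from by simp [pvStepA, h1, h2], ih]
      simp only [List.countP_cons, List.length_cons, h1, h2, if_true, Prod.mk.injEq]
      push_cast; omega
    · rw [show pvStepA (r, b, f, s) p.1 p.2 = (r, b + 1, f, s + 1) from by simp [pvStepA, h1, h2], ih]
      simp only [List.countP_cons, List.length_cons, h1, h2, Prod.mk.injEq]
      push_cast; omega

-- A equals the closed form on Pre_
lemma a_eq_closed (w f : List String) (hle : w.length ≤ f.length) :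
    find_basic_statistics w f = pvClosed w f := by
  unfold find_basic_statistics pvClosed
  rw [pvLoopA_eq_zip w f hle w.length 0 _ rfl]
  simp only [List.drop_zero]
  rw [zipFold_spec]
  have hzlen : (w.zip f).length = w.length := by simp [List.length_zip]; omega
  have hred : (w.zip f).countP (fun p => p.1 == "red") = w.countP (· == "red") := by
    calc (w.zip f).countP (fun p => p.1 == "red")
        = ((w.zip f).map Prod.fst).countP (· == "red") := by rw [List.countP_map]; rfl
      _ = w.countP (· == "red") := by rw [List.map_fst_zip hle]
  simp [hzlen, hred]

-- B equals the closed form on Pre_: strong induction on the length of winners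
lemma b_eq_closed : ∀ n (w f : List String), w.length = n → w.length ≤ f.length →
    find_basic_statistics_alt w f = pvClosed w f := by
  intro n
  induction n using Nat.strong_induction_on with
  | _ n ih =>
    intro w f hn hle
    match w, f with
    | [], _ => rw [find_basic_statistics_alt]; simp [pvClosed]
    | [a], b :: f' =>
      rw [find_basic_statistics_alt]
      simp only [List.length_cons, List.length_nil]
      norm_num [pvClosed, PySem.List.pyGet?, PySem.List.pyIdx?]
    | a :: a' :: w', f =>
      rw [find_basic_statistics_alt]
      have hlen : (a :: a' :: w').length = n := hn
      have h2n : 2 ≤ n := by simp at hlen; omega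
      rw [if_neg (by omega), if_neg (by omega)]
      set w : List String := a :: a' :: w' with hw
      set m : Nat := w.length / 2 with hm
      have hm1 : 1 ≤ m := by simp [hm]; omega
      have hmlt : m < w.length := by simp [hm]; omega
      simp only [PySem.List.slice_to_natCast, PySem.List.slice_from_natCast]
      rw [ih m (by omega) (w.take m) (f.take m)
            (by simp; omega) (by simp; omega),
          ih (n - m) (by omega) (w.drop m) (f.drop m)
            (by simp; omega) (by simp; omega)]
      unfold pvClosed
      have hzip : (w.take m).zip (f.take m) ++ (w.drop m).zip (f.drop m) = w.zip f := by
        have hl : (w.take m).length = (f.take m).length := by simp; omega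
        rw [← List.zip_append hl, List.take_append_drop, List.take_append_drop]
      have hcr : (w.take m).countP (· == "red") + (w.drop m).countP (· == "red")
          = w.countP (· == "red") := by
        rw [← List.countP_append, List.take_append_drop]
      have hcm : ((w.take m).zip (f.take m)).countP (fun p => p.1 == p.2)
          + ((w.drop m).zip (f.drop m)).countP (fun p => p.1 == p.2)
          = (w.zip f).countP (fun p => p.1 == p.2) := by
        rw [← List.countP_append, hzip]
      have hlw : (w.take m).length + (w.drop m).length = w.length := by simp; omega
      simp only [Prod.mk.injEq]
      refine ⟨by push_cast [← hcr]; ring, by push_cast [← hcr, ← hlw]; ring,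
              by push_cast [← hcm]; ring, by push_cast [← hcm, ← hlw]; ring⟩

-- ===== VERDICT (by name: the statement is the Claim_ definition above) =====
theorem find_basic_statistics_spec : Claim_equal_find_basic_statistics := by
  intro winners first_players _ hpre
  unfold Pre_find_basic_statistics at hpre
  unfold Spec_find_basic_statistics
  rw [a_eq_closed winners first_players hpre,
      b_eq_closed winners.length winners first_players rfl hpre]
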